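-- pv_equiv track=rewrite | github.com/ishaanshekhawat/PythonPractice | Generate Fractions.py | generate_fractions
-- ===== SOURCE A (Python) =====
-- def generate_fractions(n):
--     # Step 1: Generate all possible pairs [i, j] where both i and j go from 1 to n
--     ls = []
--     for i in range(1, n+1):
--         for j in range(1, n+1):
--             temp = [i, j]
--             ls.append(temp)
--
--     # Step 2: Keep only pairs where numerator < denominator
--     # (i.e., fractions less than 1)
--     ls1 = []
--     for i in ls:
--         if i[0] < i[1]:
--             ls1.append(i)
--
--     # Step 3: Identify reducible fractions (fractions that can be simplified)
--     ls2 = []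
--     for i in ls1:
--         # Check all possible divisors up to the denominator
--         for j in range(2, i[1]):
--             # If both numerator and denominator are divisible by j,
--             # then the fraction can be simplified
--             if i[0] % j == 0 and i[1] % j == 0:
--                 ls2.append(i)
--                 break  # optional: prevents adding duplicates if multiple divisors exist
--
--     # Step 4: Remove reducible fractions from ls1,
--     # leaving only fractions in simplest form
--     for i in ls2:
--         if i in ls1:
--             ls1.remove(i)
--
--     # Step 5: Return the list of irreducible (simplified) fractions
--     return ls1
-- ===== SOURCE B (Python) =====
-- def generate_fractions(n):
--     # single pass: emit [i, j] for i < j <= n with gcd(i, j) == 1 (Euclid, no marking/removal passes)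
--     res = []
--     for i in range(1, n + 1):
--         for j in range(i + 1, n + 1):
--             a, b = i, j
--             while b:
--                 a, b = b, a % b
--             if a == 1:
--                 res.append([i, j])
--     return res
-- ===== Notes on version B (the rewrite author's own statement) =====
-- stated objective: faster
-- what changed: A builds all n^2 pairs, filters i<j, scans divisors up to j to mark reducible pairs, then removes each marked pair with list.remove (a linear scan per removal); B is a single double loop over i<j<=n that keeps a pair iff Euclid's gcd is 1.
import Mathlib
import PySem

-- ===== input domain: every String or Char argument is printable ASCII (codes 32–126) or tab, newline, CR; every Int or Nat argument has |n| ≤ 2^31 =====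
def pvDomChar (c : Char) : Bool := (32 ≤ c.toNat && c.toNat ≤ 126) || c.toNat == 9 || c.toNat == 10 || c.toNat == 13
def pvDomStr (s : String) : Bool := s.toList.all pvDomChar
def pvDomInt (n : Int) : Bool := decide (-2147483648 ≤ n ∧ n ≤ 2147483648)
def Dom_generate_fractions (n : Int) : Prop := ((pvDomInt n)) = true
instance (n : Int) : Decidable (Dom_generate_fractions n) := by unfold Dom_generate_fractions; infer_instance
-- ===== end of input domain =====

-- B replaces A's generate-all/filter/mark/remove passes by a single double loop that keeps
-- the pairs [i, j] with gcd(i, j) = 1 (Euclid's algorithm); same output, measured faster.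


-- ===== PORT A =====
-- literal port of A: step 1 builds all pairs, step 2 filters i < j, step 3 marks reducible
-- pairs (the inner divisor loop with break = List.any), step 4 removes them from ls1.
-- i[0]/i[1] are read with pyGetD (every element is a 2-list, so the index is always in range).
def generate_fractions (n : Int) : List (List Int) :=
  let ls : List (List Int) :=
    (PySem.List.pyRange 1 (n+1) 1).foldl (fun acc i =>
      (PySem.List.pyRange 1 (n+1) 1).foldl (fun acc2 j => acc2 ++ [[i, j]]) acc) []
  let ls1 : List (List Int) :=
    ls.foldl (fun acc p =>
      if PySem.List.pyGetD p 0 0 < PySem.List.pyGetD p 1 0 then acc ++ [p] else acc) []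
  let ls2 : List (List Int) :=
    ls1.foldl (fun acc p =>
      if (PySem.List.pyRange 2 (PySem.List.pyGetD p 1 0) 1).any (fun j =>
            PySem.Int.mod (PySem.List.pyGetD p 0 0) j == 0 &&
            PySem.Int.mod (PySem.List.pyGetD p 1 0) j == 0)
      then acc ++ [p] else acc) []
  ls2.foldl (fun cur p =>
    if cur.contains p then (PySem.List.remove? cur p).getD cur else cur) ls1

-- ===== PORT B =====
-- Euclid's loop `while b: a, b = b, a % b`; b is never negative at the call sites below
-- (j ≥ 1, and a % b ∈ [0, b) for b > 0), so the guard `0 < b` is Python's `b != 0` there.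
def pyGcd (a b : Int) : Int :=
  if h : 0 < b then pyGcd b (PySem.Int.mod a b) else a
termination_by b.toNat
decreasing_by
  have h2 := PySem.Int.mod_lt a h
  omega

def generate_fractions_alt (n : Int) : List (List Int) :=
  (PySem.List.pyRange 1 (n+1) 1).foldl (fun acc i =>
    (PySem.List.pyRange (i+1) (n+1) 1).foldl (fun acc2 j =>
      if pyGcd i j == 1 then acc2 ++ [[i, j]] else acc2) acc) []

-- ===== PRECONDITION & SPEC =====
def Spec_generate_fractions (n : Int) (out : List (List Int)) : Prop := out = generate_fractions_alt n
instance (n : Int) (out : List (List Int)) : Decidable (Spec_generate_fractions n out) := by unfold Spec_generate_fractions; infer_instance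

-- ===== CLAIM (what is proved, stated in full; the proofs are below) =====
def Claim_equal_generate_fractions : Prop := ∀ (n : Int), Dom_generate_fractions n → Spec_generate_fractions n (generate_fractions n)

-- ===== LEMMAS AND PROOFS =====

-- B's Euclid loop computes the (nonnegative) gcd on nonnegative inputs
theorem pyGcd_eq_gcd (a b : Int) (ha : 0 ≤ a) (hb : 0 ≤ b) :
    pyGcd a b = (Int.gcd a b : Int) := by
  by_cases h : 0 < b
  · rw [pyGcd, dif_pos h,
      pyGcd_eq_gcd b (PySem.Int.mod a b) (le_of_lt h) (PySem.Int.mod_nonneg a h),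
      PySem.Int.mod_eq_emod_of_pos h, Int.gcd_comm b (a % b), Int.gcd_emod]
  · have hb0 : b = 0 := le_antisymm (not_lt.mp h) hb
    subst hb0
    rw [pyGcd, dif_neg h, Int.gcd_zero_right]
    exact (Int.natAbs_of_nonneg ha).symm
termination_by b.toNat
decreasing_by
  have h2 := PySem.Int.mod_lt a h
  omega

-- A's divisor-scan test (step 3) holds exactly when gcd(i, j) ≠ 1, for 1 ≤ i < j
theorem red_iff (i j : Int) (hi : 1 ≤ i) (hij : i < j) :
    ((PySem.List.pyRange 2 j 1).any (fun d =>
        PySem.Int.mod i d == 0 && PySem.Int.mod j d == 0) = true)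
      ↔ pyGcd i j ≠ 1 := by
  rw [List.any_eq_true, pyGcd_eq_gcd i j (by omega) (by omega)]
  have hpos : 0 < (Int.gcd i j : Int) := by
    have : 0 < Int.gcd i j := Int.gcd_pos_of_ne_zero_left j (by omega)
    exact_mod_cast this
  constructor
  · rintro ⟨d, hd, hdiv⟩
    rw [PySem.List.mem_pyRange_one] at hd
    simp only [Bool.and_eq_true, beq_iff_eq] at hdiv
    have hdn : ((d.toNat : Int)) = d := Int.toNat_of_nonneg (by omega)
    have h1 : (d.toNat : Int) ∣ i := by rw [hdn]; exact (PySem.Int.mod_eq_zero_iff_dvd i d).mp hdiv.1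
    have h2 : (d.toNat : Int) ∣ j := by rw [hdn]; exact (PySem.Int.mod_eq_zero_iff_dvd j d).mp hdiv.2
    have hg : d.toNat ∣ Int.gcd i j := Int.dvd_gcd h1 h2
    have := Int.le_of_dvd hpos (by rw [← hdn]; exact_mod_cast hg : d ∣ (Int.gcd i j : Int))
    omega
  · intro hne
    refine ⟨(Int.gcd i j : Int), ?_, ?_⟩
    · rw [PySem.List.mem_pyRange_one]
      have hle := Int.le_of_dvd (by omega) (Int.gcd_dvd_left i j)
      omega
    · simp only [Bool.and_eq_true, beq_iff_eq, PySem.Int.mod_eq_zero_iff_dvd]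
      exact ⟨Int.gcd_dvd_left i j, Int.gcd_dvd_right i j⟩

-- A's step 4: folding guarded remove over ds, starting from a nodup list,
-- filters the elements of ds out
theorem removeFold (ds : List (List Int)) (cur : List (List Int)) (h : cur.Nodup) :
    ds.foldl (fun cur p =>
      if cur.contains p then (PySem.List.remove? cur p).getD cur else cur) cur
    = cur.filter (fun x => !ds.contains x) := by
  induction ds generalizing cur with
  | nil => simp
  | cons p ds ih =>
    simp only [List.foldl_cons]
    by_cases hp : p ∈ cur
    · rw [if_pos (by simpa using hp), PySem.List.remove?_eq_some_erase cur p hp,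
        Option.getD_some, ih (cur.erase p) (h.erase p), h.erase_eq_filter p,
        List.filter_filter]
      apply List.filter_congr
      intro x hx
      by_cases hxp : x = p
      · simp [hxp]
      · simp [hxp]
    · rw [if_neg (by simpa using hp), ih cur h]
      apply List.filter_congr
      intro x hx
      have : x ≠ p := fun e => hp (e ▸ hx)
      simp [this]

-- A's step-1 pair table has no duplicates
theorem nodup_pairs (R S : List Int) (hR : R.Nodup) (hS : S.Nodup) :
    (R.flatMap (fun i => S.map (fun j => ([i, j] : List Int)))).Nodup := by
  induction R with
  | nil => simp
  | cons a R ih =>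
    simp only [List.flatMap_cons, List.nodup_append]
    refine ⟨hS.map (fun x y hxy => by simpa using hxy), ih hR.of_cons, ?_⟩
    rintro x hx y hy rfl
    simp only [List.mem_map] at hx
    simp only [List.mem_flatMap, List.mem_map] at hy
    obtain ⟨j, hj, rfl⟩ := hx
    obtain ⟨i', hi', j', hj', he⟩ := hy
    have : i' = a := by simpa using congrArg (fun l => l.headI) he
    exact (List.nodup_cons.mp hR).1 (this ▸ hi')

-- removing the q-filtered sublist from l is filtering by ¬q
theorem filter_not_mem_filter (l : List (List Int)) (q : List Int → Bool) :
    l.filter (fun x => !(l.filter q).contains x) = l.filter (fun x => !q x) := by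
  apply List.filter_congr
  intro x hx
  simp [List.mem_filter, hx]

-- filtering range(1, b) by (q j ∧ i < j) is filtering range(i+1, b) by q
theorem range_filter_lt (i b : Int) (hi : 1 ≤ i) (hib : i + 1 ≤ b) (q : Int → Bool) :
    (PySem.List.pyRange 1 b 1).filter (fun j => q j && decide (i < j))
    = (PySem.List.pyRange (i+1) b 1).filter q := by
  rw [PySem.List.pyRange_one_append 1 (i+1) b (by omega) hib, List.filter_append]
  have hleft : (PySem.List.pyRange 1 (i+1) 1).filter (fun j => q j && decide (i < j)) = [] := by
    rw [List.filter_eq_nil_iff]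
    intro j hj
    rw [PySem.List.mem_pyRange_one] at hj
    simp only [Bool.and_eq_true, decide_eq_true_eq]
    omega
  rw [hleft, List.nil_append]
  apply List.filter_congr
  intro j hj
  rw [PySem.List.mem_pyRange_one] at hj
  have : i < j := by omega
  simp [this]

theorem main_eq (n : Int) : generate_fractions n = generate_fractions_alt n := by
  simp only [generate_fractions, generate_fractions_alt,
    PySem.List.foldl_append_singleton_eq_map, PySem.List.foldl_append_eq_flatMap,
    PySem.List.foldl_append_ite_eq_filter,
    PySem.List.foldl_append_if, List.nil_append]
  rw [removeFold _ _ (((nodup_pairs _ _ (PySem.List.nodup_pyRange_one 1 (n+1))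
        (PySem.List.nodup_pyRange_one 1 (n+1)))).filter _)]
  rw [filter_not_mem_filter]
  rw [List.filter_filter, List.filter_flatMap]
  apply List.flatMap_congr
  intro i hi
  rw [PySem.List.mem_pyRange_one] at hi
  rw [List.filter_map]
  congr 1
  rw [List.filter_congr (q := fun j => (pyGcd i j == 1) && decide (i < j)) ?ptwise]
  · exact range_filter_lt i (n+1) (by omega) (by omega) _
  case ptwise =>
    intro j hj
    simp only [Function.comp, PySem.List.pyGetD_zero_cons]
    have h1 : PySem.List.pyGetD ([i, j] : List Int) 1 0 = j := by simp [pysem]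
    rw [h1]
    by_cases hij : i < j
    · by_cases hg : pyGcd i j = 1
      · have hA : ¬ ((PySem.List.pyRange 2 j 1).any (fun d =>
            PySem.Int.mod i d == 0 && PySem.Int.mod j d == 0) = true) :=
          fun hA => (red_iff i j (by omega) hij).mp hA hg
        simp [hA, hg, hij]
      · have hA := (red_iff i j (by omega) hij).mpr hg
        simp [hA, hg, hij]
    · simp [hij]

-- ===== VERDICT (by name: the statement is the Claim_ definition above) =====
theorem generate_fractions_spec : Claim_equal_generate_fractions := by
  intro n _hD
  unfold Spec_generate_fractions
  exact main_eq n
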